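-- pv_equiv track=rewrite | github.com/cp14msh/PythonSteganography | decode.py | find_repeating_pattern
-- ===== SOURCE A (Python) =====
-- def find_repeating_pattern(data):
--     max_check_length = len(data) // 2
--
--     for length in range(1, max_check_length + 1):
--
--         segment_1 = data[0:length]
--         segment_2 = data[length : length * 2]
--
--         if segment_1 == segment_2:
--             return segment_1
--
--     return None
-- ===== SOURCE B (Python) =====
-- def find_repeating_pattern(data):
--     n = len(data)
--     # Z-algorithm: z[i] = length of the longest common prefix of data and data[i:]
--     z = [0] * n
--     l = r = 0
--     for i in range(1, n):
--         k = 0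
--         if i < r:
--             k = min(r - i, z[i - l])
--         while i + k < n and data[k] == data[i + k]:
--             k += 1
--         z[i] = k
--         if i + k > r:
--             l, r = i, i + k
--     for length in range(1, n // 2 + 1):
--         if z[length] >= length:
--             return data[:length]
--     return None
-- ===== Notes on version B (the rewrite author's own statement) =====
-- stated objective: faster
-- what changed: Replaces the per-length slice-and-compare scan (O(n^2)) by the Z-algorithm: compute z[i] = longest common prefix of data and data[i:] in one linear pass, then return data[:L] for the first L with z[L] >= L.
import Mathlib
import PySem

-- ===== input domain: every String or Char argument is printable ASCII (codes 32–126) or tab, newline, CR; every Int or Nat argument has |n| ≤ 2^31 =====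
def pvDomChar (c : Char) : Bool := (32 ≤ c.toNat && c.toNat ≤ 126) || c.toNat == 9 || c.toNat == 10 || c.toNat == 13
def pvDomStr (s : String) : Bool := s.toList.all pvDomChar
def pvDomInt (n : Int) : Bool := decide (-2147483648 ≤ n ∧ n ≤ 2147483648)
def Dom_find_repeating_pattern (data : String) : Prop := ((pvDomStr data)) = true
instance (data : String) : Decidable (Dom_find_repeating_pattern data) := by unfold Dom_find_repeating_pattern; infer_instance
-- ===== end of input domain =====

-- B replaces A's per-length slice-and-compare scan by the Z-algorithm (one linear pass), objective: faster (asymptotic).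

-- B replaces A's per-length slice-and-compare scan by the Z-algorithm (one linear pass); objective: faster.

-- ===== PORT A =====
-- the 'for length in range(1, max_check_length + 1)' loop with early return
def pvFindA (s : List Char) : List Int → Option (List Char)
  | [] => none
  | L :: rest =>
    let seg1 := PySem.List.slice s (some 0) (some L)
    let seg2 := PySem.List.slice s (some L) (some (L * 2))
    if seg1 = seg2 then some seg1 else pvFindA s rest

def find_repeating_pattern (data : String) : Option String :=
  let n : Int := PySem.Str.len data
  let max_check_length : Int := PySem.Int.floordiv n 2
  (pvFindA data.toList (PySem.List.pyRange 1 (max_check_length + 1) 1)).map String.ofList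

-- ===== PORT B =====
-- the inner 'while i + k < n and data[k] == data[i + k]: k += 1' loop
def pvZExtend (s : List Char) (i : Nat) (k : Nat) : Nat :=
  if h : i + k < s.length ∧ s[k]? = s[i + k]? then pvZExtend s i (k + 1) else k
termination_by s.length - (i + k)
decreasing_by omega

-- the body of 'for i in range(1, n)' over state (z, l, r)
def pvZStep (s : List Char) (st : List Nat × Nat × Nat) (i : Nat) : List Nat × Nat × Nat :=
  let z := st.1
  let l := st.2.1
  let r := st.2.2
  let k0 := if i < r then min (r - i) (z.getD (i - l) 0) else 0
  let k := pvZExtend s i k0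
  let z' := z.set i k
  if r < i + k then (z', i, i + k) else (z', l, r)

-- z = [0]*n; for i in range(1, n): …
def pvZArr (s : List Char) : List Nat :=
  ((List.range' 1 (s.length - 1)).foldl (pvZStep s) (List.replicate s.length 0, 0, 0)).1

-- 'for length in range(1, n//2 + 1): if z[length] >= length: return data[:length]'
def pvFindB (s : List Char) (z : List Nat) : List Nat → Option (List Char)
  | [] => none
  | L :: rest => if L ≤ z.getD L 0 then some (s.take L) else pvFindB s z rest

def find_repeating_pattern_alt (data : String) : Option String :=
  let s := data.toList
  (pvFindB s (pvZArr s) (List.range' 1 (s.length / 2))).map String.ofList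

-- ===== PRECONDITION & SPEC =====
def Spec_find_repeating_pattern (data : String) (out : Option String) : Prop := out = find_repeating_pattern_alt data
instance (data : String) (out : Option String) : Decidable (Spec_find_repeating_pattern data out) := by unfold Spec_find_repeating_pattern; infer_instance

-- ===== CLAIM (what is proved, stated in full; the proofs are below) =====
def Claim_equal_find_repeating_pattern : Prop := ∀ (data : String), Dom_find_repeating_pattern data → Spec_find_repeating_pattern data (find_repeating_pattern data)

-- ===== LEMMAS AND PROOFS =====

-- longest common prefix of two character lists (the specification of z[i])
def pvLcp : List Char → List Char → Nat
  | a :: as, b :: bs => if a = b then pvLcp as bs + 1 else 0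
  | _, _ => 0

theorem pvLcp_le_left (a b : List Char) : pvLcp a b ≤ a.length := by
  induction a generalizing b with
  | nil => cases b <;> simp [pvLcp]
  | cons x as ih =>
    cases b with
    | nil => simp [pvLcp]
    | cons y bs =>
      simp only [pvLcp, List.length_cons]
      split_ifs with h
      · exact Nat.succ_le_succ (ih bs)
      · omega

theorem pvLcp_le_right (a b : List Char) : pvLcp a b ≤ b.length := by
  induction a generalizing b with
  | nil => cases b <;> simp [pvLcp]
  | cons x as ih =>
    cases b with
    | nil => simp [pvLcp]
    | cons y bs =>
      simp only [pvLcp, List.length_cons]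
      split_ifs with h
      · exact Nat.succ_le_succ (ih bs)
      · omega

theorem le_pvLcp_iff (a b : List Char) (k : Nat) :
    k ≤ pvLcp a b ↔ k ≤ a.length ∧ a.take k = b.take k := by
  induction a generalizing b k with
  | nil =>
    cases b <;> cases k <;> simp [pvLcp]
  | cons x as ih =>
    cases b with
    | nil =>
      cases k <;> simp [pvLcp]
    | cons y bs =>
      cases k with
      | zero => simp [pvLcp]
      | succ k =>
        simp only [pvLcp, List.length_cons, List.take_succ_cons, List.cons.injEq]
        split_ifs with h
        · subst h
          constructor
          · rintro hk
            have := (ih bs k).mp (Nat.le_of_succ_le_succ hk)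
            exact ⟨Nat.succ_le_succ this.1, rfl, this.2⟩
          · rintro ⟨h1, -, h2⟩
            exact Nat.succ_le_succ ((ih bs k).mpr ⟨Nat.le_of_succ_le_succ h1, h2⟩)
        · constructor
          · omega
          · rintro ⟨-, h1, -⟩; exact absurd h1 h

theorem get?_eq_of_lt_pvLcp (a b : List Char) (t : Nat) (h : t < pvLcp a b) :
    a[t]? = b[t]? := by
  induction a generalizing b t with
  | nil => cases b <;> simp [pvLcp] at h
  | cons x as ih =>
    cases b with
    | nil => simp [pvLcp] at h
    | cons y bs =>
      simp only [pvLcp] at h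
      split_ifs at h with he
      · subst he
        cases t with
        | zero => rfl
        | succ t => simpa using ih bs t (Nat.lt_of_succ_lt_succ h)
      · omega

theorem get?_pvLcp_ne (a b : List Char) (h : a[pvLcp a b]? = b[pvLcp a b]?) :
    a[pvLcp a b]? = none := by
  induction a generalizing b with
  | nil => simp
  | cons x as ih =>
    cases b with
    | nil => simp [pvLcp] at h ⊢
    | cons y bs =>
      simp only [pvLcp] at h ⊢
      split_ifs with he
      · subst he
        rw [if_pos rfl] at h
        simp only [List.getElem?_cons_succ] at h ⊢
        exact ih bs h
      · rw [if_neg he] at h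
        exact absurd (by simpa using h) he

-- the specification value of z[i]
def pvZsp (s : List Char) (i : Nat) : Nat := pvLcp s (s.drop i)

theorem pvZExtend_eq (s : List Char) (i : Nat) :
    ∀ k, k ≤ pvZsp s i → pvZExtend s i k = pvZsp s i := by
  suffices h : ∀ d k, k ≤ pvZsp s i → pvZsp s i - k = d → pvZExtend s i k = pvZsp s i by
    intro k hk; exact h _ k hk rfl
  intro d
  induction d with
  | zero =>
    intro k hk hd
    have hk' : k = pvZsp s i := by omega
    subst hk'
    rw [pvZExtend, dif_neg]
    rintro ⟨hlt, heq⟩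
    have h0 : s[pvZsp s i]? = (s.drop i)[pvZsp s i]? := by
      rw [List.getElem?_drop]; exact heq
    have h1 : s[pvZsp s i]? = none := get?_pvLcp_ne s (s.drop i) h0
    have h2 : s[i + pvZsp s i]? = some s[i + pvZsp s i] := List.getElem?_eq_getElem hlt
    rw [← heq, h1] at h2
    cases h2
  | succ d ih =>
    intro k hk hd
    have hklt : k < pvZsp s i := by omega
    have h1 : s[k]? = s[i + k]? := by
      have h := get?_eq_of_lt_pvLcp s (s.drop i) k hklt
      rwa [List.getElem?_drop] at h
    have hkn : k < s.length := lt_of_lt_of_le hklt (pvLcp_le_left _ _)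
    have h2 : i + k < s.length := by
      have hsome : s[i + k]?.isSome = true := by rw [← h1]; simp [hkn]
      simpa using hsome
    rw [pvZExtend, dif_pos ⟨h2, h1⟩]
    exact ih (k + 1) (by omega) (by omega)

theorem take_eq_of_get? (a b : List Char) (k : Nat) (h : ∀ t, t < k → a[t]? = b[t]?) :
    a.take k = b.take k := by
  apply List.ext_getElem?
  intro t
  by_cases ht : t < k
  · rw [List.getElem?_take_of_lt ht, List.getElem?_take_of_lt ht, h t ht]
  · rw [List.getElem?_take, List.getElem?_take, if_neg ht, if_neg ht]

-- loop invariant of the Z fold after processing i = 1 .. j-1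
def pvInv (s : List Char) (j : Nat) (st : List Nat × Nat × Nat) : Prop :=
  st.1.length = s.length ∧
  (∀ t, st.1.getD t 0 ≤ pvZsp s t) ∧
  (∀ t, 1 ≤ t → t < j → st.1.getD t 0 = pvZsp s t) ∧
  st.2.1 < j ∧ st.2.1 ≤ st.2.2 ∧ st.2.2 ≤ s.length ∧
  s.take (st.2.2 - st.2.1) = (s.drop st.2.1).take (st.2.2 - st.2.1)

theorem pvInv_step (s : List Char) (i : Nat) (st : List Nat × Nat × Nat)
    (h1 : 1 ≤ i) (hn : i < s.length) (h : pvInv s i st) :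
    pvInv s (i + 1) (pvZStep s st i) := by
  obtain ⟨z, l, r⟩ := st
  simp only [pvInv] at h ⊢
  obtain ⟨hA, hB, hC, hD, hE, hF, hG⟩ := h
  have hbox : ∀ u, u < r - l → s[u]? = s[l + u]? := by
    intro u hu
    have hgu := congrArg (fun xs => xs[u]?) hG
    simp only [List.getElem?_take_of_lt hu, List.getElem?_drop] at hgu
    exact hgu
  simp only [pvZStep]
  set k0 := (if i < r then min (r - i) (z.getD (i - l) 0) else 0) with hk0def
  have hpoint : ∀ t, t < k0 → s[t]? = s[i + t]? := by
    intro t ht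
    by_cases hir : i < r
    · rw [hk0def, if_pos hir] at ht
      have ht1 : t < r - i := lt_of_lt_of_le ht (min_le_left _ _)
      have ht2 : t < z.getD (i - l) 0 := lt_of_lt_of_le ht (min_le_right _ _)
      have e1 : s[t]? = s[(i - l) + t]? := by
        have he := get?_eq_of_lt_pvLcp s (s.drop (i - l)) t (lt_of_lt_of_le ht2 (hB (i - l)))
        rwa [List.getElem?_drop] at he
      have hu : (i - l) + t < r - l := by omega
      have e2 := hbox _ hu
      have e3 : l + ((i - l) + t) = i + t := by omega
      rw [e1, e2, e3]
    · rw [hk0def, if_neg hir] at ht; omega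
  have hk0n : k0 ≤ s.length := by rw [hk0def]; split_ifs <;> omega
  have hk0le : k0 ≤ pvZsp s i := by
    refine (le_pvLcp_iff s (s.drop i) k0).mpr ⟨hk0n, ?_⟩
    exact take_eq_of_get? _ _ _ (fun t ht => by rw [hpoint t ht, List.getElem?_drop])
  have hkeq : pvZExtend s i k0 = pvZsp s i := pvZExtend_eq s i k0 hk0le
  rw [hkeq]
  have hkub : pvZsp s i ≤ s.length - i := by
    have := pvLcp_le_right s (s.drop i)
    simpa [pvZsp] using this
  have hset : ∀ t, (z.set i (pvZsp s i)).getD t 0 = if t = i then pvZsp s i else z.getD t 0 := by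
    intro t
    by_cases ht : t = i
    · subst ht
      rw [if_pos rfl]
      simp only [List.getD]
      rw [List.getElem?_set_self (by omega)]
      rfl
    · rw [if_neg ht]
      simp only [List.getD]
      rw [List.getElem?_set_ne (fun he => ht he.symm)]
  have hB' : ∀ t, (z.set i (pvZsp s i)).getD t 0 ≤ pvZsp s t := by
    intro t; rw [hset t]; split_ifs with ht
    · subst ht; exact le_refl _
    · exact hB t
  have hC' : ∀ t, 1 ≤ t → t < i + 1 → (z.set i (pvZsp s i)).getD t 0 = pvZsp s t := by
    intro t ht1 ht2; rw [hset t]; split_ifs with ht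
    · subst ht; rfl
    · exact hC t ht1 (by omega)
  have hA' : (z.set i (pvZsp s i)).length = s.length := by simpa using hA
  split_ifs with hupd
  · dsimp only
    refine ⟨hA', hB', hC', by omega, by omega, by omega, ?_⟩
    have e : i + pvZsp s i - i = pvZsp s i := by omega
    rw [e]
    exact ((le_pvLcp_iff s (s.drop i) (pvZsp s i)).mp (le_refl _)).2
  · dsimp only
    exact ⟨hA', hB', hC', by omega, hE, hF, hG⟩

theorem pvInv_fold (s : List Char) (c : Nat) (hc : 1 + c ≤ s.length ∨ c = 0) :
    pvInv s (1 + c) ((List.range' 1 c).foldl (pvZStep s) (List.replicate s.length 0, 0, 0)) := by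
  induction c with
  | zero =>
    rw [show List.range' 1 0 = [] from rfl, List.foldl_nil]
    refine ⟨by simp, ?_, ?_, by dsimp only; omega, le_refl _, by simp, by simp⟩
    · intro t; simp [List.getD]
    · intro t h1 h2; omega
  | succ c ih =>
    have hc' : 1 + c + 1 ≤ s.length := by omega
    rw [List.range'_1_concat, List.foldl_append, List.foldl_cons, List.foldl_nil]
    have hstep := pvInv_step s (1 + c) _ (by omega) (by omega) (ih (by omega))
    have e : 1 + c + 1 = 1 + (c + 1) := by omega
    rwa [e] at hstep

theorem pvZArr_spec (s : List Char) (t : Nat) (ht1 : 1 ≤ t) (ht2 : t < s.length) :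
    (pvZArr s).getD t 0 = pvZsp s t := by
  have h := pvInv_fold s (s.length - 1) (by omega)
  exact h.2.2.1 t ht1 (by omega)

theorem pvSliceA_eq_take (s : List Char) (L : Nat) :
    PySem.List.slice s (some 0) (some (L : Int)) = s.take L := by
  simp [pysem]

theorem pvSliceA_eq_drop_take (s : List Char) (L : Nat) :
    PySem.List.slice s (some (L : Int)) (some ((L : Int) * 2)) = (s.drop L).take L := by
  have h : ((L : Int)) * 2 = ((L * 2 : Nat) : Int) := by push_cast; ring
  rw [h, PySem.List.slice_natCast]
  congr 1; omega

theorem pvPred_iff (s : List Char) (L : Nat) (h1 : 1 ≤ L) (h2 : L ≤ s.length / 2) :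
    (PySem.List.slice s (some 0) (some (L : Int)) = PySem.List.slice s (some (L : Int)) (some ((L : Int) * 2))
      ↔ L ≤ (pvZArr s).getD L 0) := by
  rw [pvSliceA_eq_take, pvSliceA_eq_drop_take]
  rw [pvZArr_spec s L h1 (by omega)]
  rw [show (pvZsp s L) = pvLcp s (s.drop L) from rfl]
  rw [le_pvLcp_iff]
  constructor
  · intro h; exact ⟨by omega, h⟩
  · intro h; exact h.2

theorem pvFind_eq (s : List Char) (c : Nat) :
    ∀ start : Nat, 1 ≤ start → start + c ≤ s.length / 2 + 1 →
    pvFindA s (PySem.List.pyRange (start : Int) ((start : Int) + (c : Int)) 1)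
      = pvFindB s (pvZArr s) (List.range' start c) := by
  induction c with
  | zero =>
    intro start h1 hub
    rw [show ((0:Nat):Int) = 0 from rfl, add_zero,
        PySem.List.pyRange_one_eq_nil (le_refl _)]
    rfl
  | succ c ih =>
    intro start h1 hub
    have hcons : PySem.List.pyRange (start : Int) ((start : Int) + ((c+1 : Nat) : Int)) 1
        = (start : Int) :: PySem.List.pyRange ((start : Int) + 1) ((start : Int) + ((c+1 : Nat) : Int)) 1 :=
      PySem.List.pyRange_one_cons (by push_cast; omega)
    rw [hcons, List.range'_succ]
    show (if PySem.List.slice s (some 0) (some (start : Int))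
            = PySem.List.slice s (some (start : Int)) (some ((start : Int) * 2))
          then some (PySem.List.slice s (some 0) (some (start : Int)))
          else pvFindA s (PySem.List.pyRange ((start : Int) + 1) ((start : Int) + ((c+1 : Nat) : Int)) 1))
        = _
    have hiff := pvPred_iff s start h1 (by omega)
    have htail : pvFindA s (PySem.List.pyRange ((start : Int) + 1) ((start : Int) + ((c+1 : Nat) : Int)) 1)
        = pvFindB s (pvZArr s) (List.range' (start + 1) c) := by
      have e1 : ((start : Int) + 1) = (((start + 1 : Nat)) : Int) := by push_cast; ring
      have e2 : ((start : Int) + ((c+1 : Nat) : Int)) = (((start + 1 : Nat)) : Int) + ((c : Nat) : Int) := by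
        push_cast; ring
      rw [e1, e2]
      exact ih (start + 1) (by omega) (by omega)
    by_cases hp : start ≤ (pvZArr s).getD start 0
    · rw [if_pos (hiff.mpr hp), pvFindB, if_pos hp, pvSliceA_eq_take]
    · rw [if_neg (fun hh => hp (hiff.mp hh)), pvFindB, if_neg hp, htail]

theorem pvMain (data : String) : find_repeating_pattern data = find_repeating_pattern_alt data := by
  simp only [find_repeating_pattern, find_repeating_pattern_alt]
  have hlen : PySem.Str.len data = ((data.toList.length : Nat) : Int) := by simp [pysem]
  rw [hlen]
  have e2 : PySem.Int.floordiv ((data.toList.length : Nat) : Int) 2 + 1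
      = ((1 : Nat) : Int) + (((data.toList.length / 2 : Nat)) : Int) := by
    simp; omega
  rw [e2]
  exact congrArg (Option.map String.ofList)
    (pvFind_eq data.toList (data.toList.length / 2) 1 (le_refl _) (by omega))

-- ===== VERDICT (by name: the statement is the Claim_ definition above) =====
theorem find_repeating_pattern_spec : Claim_equal_find_repeating_pattern := by
  unfold Claim_equal_find_repeating_pattern Spec_find_repeating_pattern
  intro data _
  exact pvMain data
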